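-- pv_equiv track=rewrite | github.com/btretto03/MC102 | Beecrowd/5/5.py | dancante
-- ===== SOURCE A (Python) =====
-- def dancante(frase):
--     '''A função pega uma frase aleatória e a transforma em dançante.'''
--     resultado = ""
--     maiuscula = True   # para começar com maiúscula
--     for x in frase:
--         if x != ' ':
--             if maiuscula:
--                 resultado += x.upper()
--             else:
--                 resultado += x.lower()
--             maiuscula = not maiuscula #retorna pra minuscula
--         else:
--             resultado += ' '
--     return resultado
-- ===== SOURCE B (Python) =====
-- def dancante(frase):
--     '''A função pega uma frase aleatória e a transforma em dançante.'''
--     letters = [c for c in frase if c != ' ']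
--     cased = [c.upper() if i % 2 == 0 else c.lower() for i, c in enumerate(letters)]
--     it = iter(cased)
--     return ''.join(c if c == ' ' else next(it) for c in frase)
-- ===== Notes on version B (the rewrite author's own statement) =====
-- stated objective: alternative
-- what changed: Replaces A's single stateful toggle loop by a filter-then-merge decomposition: the non-space characters are cased by index parity in one comprehension, then a second positional pass re-inserts them between the spaces.
import Mathlib
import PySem

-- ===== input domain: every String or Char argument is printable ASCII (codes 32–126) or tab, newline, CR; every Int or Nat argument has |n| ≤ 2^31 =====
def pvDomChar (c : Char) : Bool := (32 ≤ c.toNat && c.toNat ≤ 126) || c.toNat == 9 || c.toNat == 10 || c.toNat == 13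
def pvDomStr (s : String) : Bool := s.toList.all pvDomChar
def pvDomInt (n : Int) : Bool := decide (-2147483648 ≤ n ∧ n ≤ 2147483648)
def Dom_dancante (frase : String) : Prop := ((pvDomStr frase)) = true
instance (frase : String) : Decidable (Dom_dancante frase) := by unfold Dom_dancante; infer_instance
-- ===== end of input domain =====

-- B merges spaces with the cased non-space stream (alternative decomposition of A's toggle loop).

-- ===== PORT A =====
-- A: one pass with an accumulated string and a toggle boolean 'maiuscula'.
def pvStepA (st : List Char × Bool) (x : Char) : List Char × Bool :=
  if x ≠ ' ' then
    ((st.1 ++ [if st.2 then PySem.Chars.upperChar x else PySem.Chars.lowerChar x]), !st.2)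
  else
    (st.1 ++ [' '], st.2)

def dancante (frase : String) : String :=
  let r := frase.toList.foldl pvStepA ([], true)
  String.ofList r.1

-- ===== PORT B =====
-- next(it) in B: consume the head of the cased stream; the [] branch is Python's
-- StopIteration, unreachable because the stream has one element per non-space char.
def pvMerge : List Char → List Char → List Char
  | [], _ => []
  | c :: rest, it =>
    if c = ' ' then ' ' :: pvMerge rest it
    else
      match it with
      | t :: ts => t :: pvMerge rest ts
      | [] => []

def dancante_alt (frase : String) : String :=
  let letters := frase.toList.filter (fun c => c ≠ ' ')
  let cased := (PySem.List.enumerate letters 0).map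
    (fun p => if PySem.Int.mod p.1 2 = 0 then PySem.Chars.upperChar p.2 else PySem.Chars.lowerChar p.2)
  String.ofList (pvMerge frase.toList cased)

-- ===== PRECONDITION & SPEC =====
def Spec_dancante (frase : String) (out : String) : Prop := out = dancante_alt frase
instance (frase : String) (out : String) : Decidable (Spec_dancante frase out) := by unfold Spec_dancante; infer_instance

-- ===== CLAIM (what is proved, stated in full; the proofs are below) =====
def Claim_equal_dancante : Prop := ∀ (frase : String), Dom_dancante frase → Spec_dancante frase (dancante frase)

-- ===== LEMMAS AND PROOFS =====

-- A's loop as a structural recursion (proof-side restatement of the fold).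
def pvBodyA : List Char → Bool → List Char
  | [], _ => []
  | x :: xs, m =>
    if x ≠ ' ' then (if m then PySem.Chars.upperChar x else PySem.Chars.lowerChar x) :: pvBodyA xs (!m)
    else ' ' :: pvBodyA xs m

-- alternating casing of a list, starting with flag m
def pvAlt : List Char → Bool → List Char
  | [], _ => []
  | c :: cs, m => (if m then PySem.Chars.upperChar c else PySem.Chars.lowerChar c) :: pvAlt cs (!m)

lemma foldA_eq (s : List Char) (acc : List Char) (m : Bool) :
    (s.foldl pvStepA (acc, m)).1 = acc ++ pvBodyA s m := by
  induction s generalizing acc m with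
  | nil => simp [pvBodyA]
  | cons x xs ih =>
    rw [List.foldl_cons]
    by_cases hx : x = ' '
    · simp [pvStepA, pvBodyA, hx, ih]
    · simp [pvStepA, pvBodyA, hx, ih]

lemma bodyA_eq_merge (s : List Char) (m : Bool) :
    pvBodyA s m = pvMerge s (pvAlt (s.filter (fun c => c ≠ ' ')) m) := by
  induction s generalizing m with
  | nil => simp [pvBodyA, pvMerge]
  | cons x xs ih =>
    by_cases hx : x = ' '
    · simp [pvBodyA, pvMerge, hx, ih]
    · simp [pvBodyA, pvMerge, pvAlt, hx, ih]

lemma alt_eq_enum (xs : List Char) (n : Nat) :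
    (PySem.List.enumerate xs (n : Int)).map
      (fun p => if PySem.Int.mod p.1 2 = 0 then PySem.Chars.upperChar p.2 else PySem.Chars.lowerChar p.2)
    = pvAlt xs (n % 2 == 0) := by
  induction xs generalizing n with
  | nil => simp [pvAlt, PySem.List.enumerate_nil]
  | cons c cs ih =>
    rw [PySem.List.enumerate_cons]
    have h1 : ((n : Int) + 1) = ((n + 1 : Nat) : Int) := by push_cast; ring
    have h2 : PySem.Int.mod (n : Int) 2 = ((n % 2 : Nat) : Int) := by
      exact_mod_cast PySem.Int.mod_natCast n 2
    simp only [List.map_cons, h1, ih, pvAlt, h2]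
    rcases Nat.mod_two_eq_zero_or_one n with h | h <;>
      simp [h, Nat.add_mod]

-- ===== VERDICT (by name: the statement is the Claim_ definition above) =====
theorem dancante_spec : Claim_equal_dancante := by
  intro frase _
  show dancante frase = dancante_alt frase
  unfold dancante dancante_alt
  simp only [foldA_eq, List.nil_append]
  rw [bodyA_eq_merge]
  congr 1
  congr 1
  have := alt_eq_enum (frase.toList.filter (fun c => c ≠ ' ')) 0
  simpa using this.symm
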